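-- pv_equiv track=rewrite | github.com/TrevorBivi/minecraft-tools | read_save_file.py | change_coords
-- ===== SOURCE A (Python) =====
-- def change_coords(xz,cur_sys,new_sys):
--     '''
--     return converted xz coord system
--     '''
--     if(cur_sys == 'region'):
--         if (new_sys == 'chunk'):
--             return [i * 32 for i in xz]
--         elif(new_sys == 'block'):
--             return [i * 512 for i in xz]
--
--     elif(cur_sys == 'chunk'):
--         if(new_sys == 'region'):
--             return [i // 32 for i in xz]
--         elif(new_sys == 'block'):
--             return [i * 16 for i in xz]
--
--     elif(cur_sys == 'block'):
--         if(new_sys == 'chunk'):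
--             return [i // 16 for i in xz]
--         elif(new_sys == 'region'):
--             return [ (i // 16) //32 for i in xz]
--
--     raise ValueError('could not understand coord conversion '+cur_sys+'->'+new_sys)
-- ===== SOURCE B (Python) =====
-- def change_coords(xz, cur_sys, new_sys):
--     '''
--     return converted xz coord system
--     '''
--     sizes = {'region': 512, 'chunk': 16, 'block': 1}
--     if cur_sys not in sizes or new_sys not in sizes or cur_sys == new_sys:
--         raise ValueError('could not understand coord conversion ' + cur_sys + '->' + new_sys)
--     a, b = sizes[cur_sys], sizes[new_sys]
--     if a > b:
--         return [i * (a // b) for i in xz]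
--     return [i // (b // a) for i in xz]
-- ===== Notes on version B (the rewrite author's own statement) =====
-- stated objective: simpler
-- what changed: replaces the nested six-branch tree by a block-size table: compute one scale ratio sizes[cur]//sizes[new] (or its inverse) and apply a single uniform multiply or floor-divide, relying on (i//16)//32 == i//512
import Mathlib
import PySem

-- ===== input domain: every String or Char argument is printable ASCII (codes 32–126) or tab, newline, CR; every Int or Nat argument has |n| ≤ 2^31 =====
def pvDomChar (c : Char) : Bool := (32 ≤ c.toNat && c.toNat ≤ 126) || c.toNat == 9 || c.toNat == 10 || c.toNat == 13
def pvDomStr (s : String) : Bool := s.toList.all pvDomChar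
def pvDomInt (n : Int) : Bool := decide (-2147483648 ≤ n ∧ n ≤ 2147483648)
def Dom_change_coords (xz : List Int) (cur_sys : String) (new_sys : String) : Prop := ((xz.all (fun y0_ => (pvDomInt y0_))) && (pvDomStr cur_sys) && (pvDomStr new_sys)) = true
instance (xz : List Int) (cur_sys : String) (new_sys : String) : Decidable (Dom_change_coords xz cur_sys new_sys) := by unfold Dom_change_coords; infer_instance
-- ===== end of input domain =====

-- B replaces A's nested six-branch tree with a block-size table and one uniform
-- scale-ratio multiply/floor-divide (simpler); invalid/equal system pairs (where A raises
-- ValueError) lie outside Pre_.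


-- ===== PORT A =====
-- Literal transliteration of A's branch tree; the final `raise ValueError` path
-- returns [] here and is excluded by Pre_change_coords.
def change_coords (xz : List Int) (cur_sys : String) (new_sys : String) : List Int :=
  if cur_sys = "region" then
    if new_sys = "chunk" then xz.map (fun i => i * 32)
    else if new_sys = "block" then xz.map (fun i => i * 512)
    else []
  else if cur_sys = "chunk" then
    if new_sys = "region" then xz.map (fun i => PySem.Int.floordiv i 32)
    else if new_sys = "block" then xz.map (fun i => i * 16)
    else []
  else if cur_sys = "block" then
    if new_sys = "chunk" then xz.map (fun i => PySem.Int.floordiv i 16)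
    else if new_sys = "region" then xz.map (fun i => PySem.Int.floordiv (PySem.Int.floordiv i 16) 32)
    else []
  else []

-- ===== PORT B =====
-- sizes = {'region': 512, 'chunk': 16, 'block': 1}; none ↔ not in the table
def pvSize? (s : String) : Option Int :=
  if s = "region" then some 512
  else if s = "chunk" then some 16
  else if s = "block" then some 1
  else none

-- B: one scale ratio, one uniform operation; the ValueError path returns [] and is excluded by Pre_.
def change_coords_alt (xz : List Int) (cur_sys : String) (new_sys : String) : List Int :=
  match pvSize? cur_sys, pvSize? new_sys with
  | some a, some b =>
    if cur_sys = new_sys then []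
    else if a > b then xz.map (fun i => i * PySem.Int.floordiv a b)
    else xz.map (fun i => PySem.Int.floordiv i (PySem.Int.floordiv b a))
  | _, _ => []

-- ===== PRECONDITION & SPEC =====
-- Pre_ excludes exactly the inputs where A raises ValueError: both system names must be
-- known and distinct (the six valid conversion pairs).
def Pre_change_coords (xz : List Int) (cur_sys : String) (new_sys : String) : Prop :=
  (cur_sys = "region" ∨ cur_sys = "chunk" ∨ cur_sys = "block") ∧
  (new_sys = "region" ∨ new_sys = "chunk" ∨ new_sys = "block") ∧
  cur_sys ≠ new_sys
instance (xz : List Int) (cur_sys : String) (new_sys : String) : Decidable (Pre_change_coords xz cur_sys new_sys) := by unfold Pre_change_coords; infer_instance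

def pvWitness_change_coords : List Int × String × String := ([5, -17, 513], "block", "region")

def Spec_change_coords (xz : List Int) (cur_sys : String) (new_sys : String) (out : List Int) : Prop := out = change_coords_alt xz cur_sys new_sys
instance (xz : List Int) (cur_sys : String) (new_sys : String) (out : List Int) : Decidable (Spec_change_coords xz cur_sys new_sys out) := by unfold Spec_change_coords; infer_instance

-- ===== CLAIM (what is proved, stated in full; the proofs are below) =====
def Claim_equal_change_coords : Prop := ∀ (xz : List Int) (cur_sys : String) (new_sys : String), Dom_change_coords xz cur_sys new_sys → Pre_change_coords xz cur_sys new_sys → Spec_change_coords xz cur_sys new_sys (change_coords xz cur_sys new_sys)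

-- ===== LEMMAS AND PROOFS =====

-- A's block→region double floor-division equals B's single division by 512.
theorem pv_div_512_ediv (i : Int) : i / 16 / 32 = i / 512 := by omega

-- ===== VERDICT (by name: the statement is the Claim_ definition above) =====
theorem change_coords_spec : Claim_equal_change_coords := by
  intro xz cur_sys new_sys _ hpre
  obtain ⟨hc, hn, hne⟩ := hpre
  unfold Spec_change_coords change_coords change_coords_alt pvSize?
  rcases hc with hc | hc | hc <;> rcases hn with hn | hn | hn <;>
    subst hc <;> subst hn <;> simp_all <;>
    first
      | rfl
      | (intro i _; exact_mod_cast pv_div_512_ediv i)
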